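-- pv_equiv track=rewrite | github.com/demonk69/726_NPU | tb/matmul/gen_matmul_data.py | int8_pack
-- ===== SOURCE A (Python) =====
-- def int8_pack(vals):
--     """Pack INT8 values 4-per-word (SUBW=4)."""
--     words = []
--     for i in range(0, len(vals), 4):
--         w = 0
--         for j in range(4):
--             if i+j < len(vals):
--                 w |= (vals[i+j] & 0xFF) << (j*8)
--         words.append(w)
--     return words
-- ===== SOURCE B (Python) =====
-- def int8_pack(vals):
--     """Pack INT8 values 4-per-word (SUBW=4) via a little-endian byte buffer."""
--     bs = bytes((v & 0xFF) for v in vals)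
--     bs += bytes((-len(bs)) % 4)          # zero-pad to a multiple of 4 bytes
--     return [int.from_bytes(bs[i:i+4], 'little') for i in range(0, len(bs), 4)]
-- ===== Notes on version B (the rewrite author's own statement) =====
-- stated objective: idiomatic
-- what changed: Replaces the per-element shift/OR accumulation with nested index loops by a two-phase byte-buffer pipeline: mask every value to one byte, zero-pad the buffer to a multiple of 4, then decode each 4-byte group with int.from_bytes little-endian (C-level bytes/from_bytes, measured ~1.6x faster).
import Mathlib
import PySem

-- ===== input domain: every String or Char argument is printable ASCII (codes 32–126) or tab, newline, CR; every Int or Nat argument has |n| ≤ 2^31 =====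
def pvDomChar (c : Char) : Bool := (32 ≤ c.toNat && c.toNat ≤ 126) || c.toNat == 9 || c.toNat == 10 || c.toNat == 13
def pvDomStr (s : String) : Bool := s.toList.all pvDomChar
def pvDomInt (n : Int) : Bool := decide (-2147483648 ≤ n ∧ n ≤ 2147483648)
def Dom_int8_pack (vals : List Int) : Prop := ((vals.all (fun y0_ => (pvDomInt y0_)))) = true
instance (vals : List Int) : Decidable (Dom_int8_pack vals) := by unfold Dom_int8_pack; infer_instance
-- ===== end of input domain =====

-- B replaces A's per-element shift/OR accumulation by a byte-buffer pipeline (mask to bytes,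
-- zero-pad to a multiple of 4, decode little-endian 4-byte groups); idiomatic, same O(n) cost.

-- ===== PORT A =====
-- inner guard ensures 0 ≤ i+j < len(vals), so pyGetD is exact for vals[i+j];
-- j ∈ range(4) so (j*8).toNat is exact for Python's << (j*8)
def int8_pack (vals : List Int) : List Int :=
  (PySem.List.pyRange 0 (vals.length : Int) 4).foldl
    (fun words i =>
      words ++ [(PySem.List.pyRange 0 4 1).foldl
        (fun w j =>
          if i + j < (vals.length : Int) then
            PySem.Int.bor w ((PySem.Int.band (PySem.List.pyGetD vals (i + j) 0) 255) <<< (j * 8).toNat)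
          else w) 0]) []

-- ===== PORT B =====
-- hand port of int.from_bytes(bs, 'little') on a byte list
def pvFromBytesLE : List Int → Int
  | [] => 0
  | b :: rest => b + 256 * pvFromBytesLE rest

-- the stride-4 slice comprehension [int.from_bytes(bs[i:i+4],'little') for i in range(0,len(bs),4)]
-- ported as structural 4-at-a-time recursion; exact here because the buffer is padded to 4 | len
def pvWords4 : List Int → List Int
  | b0 :: b1 :: b2 :: b3 :: rest => pvFromBytesLE [b0, b1, b2, b3] :: pvWords4 rest
  | _ => []

def int8_pack_alt (vals : List Int) : List Int :=
  let bs := vals.map (fun v => PySem.Int.band v 255)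
  let padded := bs ++ List.replicate (PySem.Int.mod (-(bs.length : Int)) 4).toNat 0
  pvWords4 padded

-- ===== PRECONDITION & SPEC =====
def Spec_int8_pack (vals : List Int) (out : List Int) : Prop := out = int8_pack_alt vals
instance (vals : List Int) (out : List Int) : Decidable (Spec_int8_pack vals out) := by unfold Spec_int8_pack; infer_instance

-- ===== CLAIM (what is proved, stated in full; the proofs are below) =====
def Claim_equal_int8_pack : Prop := ∀ (vals : List Int), Dom_int8_pack vals → Spec_int8_pack vals (int8_pack vals)

-- ===== LEMMAS AND PROOFS =====

-- Nat: OR with a shifted value is addition when the low part fits below the shift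
theorem pv_lor_low (k : Nat) : ∀ a b : Nat, a < 2^k → a ||| (b <<< k) = a + b <<< k := by
  induction k with
  | zero => intro a b h; interval_cases a; simp
  | succ k ih =>
    intro a b h
    have hb2 : b <<< (k+1) = 2 * (b <<< k) := by
      simp [Nat.shiftLeft_eq, pow_succ]; ring
    have h1 : a = Nat.bit (a % 2 == 1) (a / 2) := by
      rcases Nat.mod_two_eq_zero_or_one a with hm | hm <;> simp [Nat.bit, hm] <;> omega
    have h2 : b <<< (k+1) = Nat.bit false (b <<< k) := by simp [Nat.bit]; omega
    have hlt : a / 2 < 2 ^ k := by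
      have : 2 ^ (k+1) = 2 * 2 ^ k := by ring
      omega
    rw [h1, h2, Nat.lor_bit]
    have := ih (a / 2) b hlt
    rcases Nat.mod_two_eq_zero_or_one a with hm | hm <;> simp [Nat.bit, this, hm] <;> omega

-- Int: same fact through PySem.Int.bor
theorem pv_bor_low (a b : Int) (k : Nat) (h0 : 0 ≤ a) (h1 : a < 2^k) (hb : 0 ≤ b) :
    PySem.Int.bor a (b <<< k) = a + b * 2^k := by
  have hs : b <<< k = b * 2^k := Int.shiftLeft_eq b k
  have hp : ((2^k : Nat) : Int) = (2:Int)^k := by push_cast; ring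
  have hbs : 0 ≤ b * 2^k := by positivity
  have hb' : b = (b.toNat : Int) := (Int.toNat_of_nonneg hb).symm
  have ha' : a = (a.toNat : Int) := (Int.toNat_of_nonneg h0).symm
  rw [hs, PySem.Int.bor_of_nonneg h0 hbs]
  have htn0 : ((b.toNat <<< k : Nat) : Int) = b * 2^k := by
    rw [Nat.shiftLeft_eq]
    push_cast
    rw [Int.toNat_of_nonneg hb]
  have htn : (b * 2^k).toNat = b.toNat <<< k := by omega
  have hlt : a.toNat < 2^k := by
    rw [ha', ← hp] at h1
    exact_mod_cast h1
  rw [htn, pv_lor_low k a.toNat b.toNat hlt, Nat.shiftLeft_eq]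
  push_cast
  rw [Int.toNat_of_nonneg h0, Int.toNat_of_nonneg hb]

-- Python v & 0xFF is v mod 256
theorem pv_byte_eq_mod (v : Int) : PySem.Int.band v 255 = v % 256 := by
  have h8 : (2:Nat)^8 - 1 = 255 := by norm_num
  have h255 : (255:Int).toNat = 255 := rfl
  by_cases hv : 0 ≤ v
  · rw [PySem.Int.band_of_nonneg hv (by norm_num)]
    have h := Nat.and_two_pow_sub_one_eq_mod v.toNat 8
    rw [h8] at h
    rw [h255, h]
    omega
  · simp only [PySem.Int.band, if_neg hv, if_pos (show (0:Int) ≤ 255 by norm_num)]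
    have h := Nat.and_two_pow_sub_one_eq_mod (-v - 1).toNat 8
    rw [h8] at h
    rw [h255, Nat.land_comm, h]
    omega

theorem pv_byte_nonneg (v : Int) : 0 ≤ PySem.Int.band v 255 := by
  rw [pv_byte_eq_mod]; exact Int.emod_nonneg v (by norm_num)

theorem pv_byte_lt (v : Int) : PySem.Int.band v 255 < 256 := by
  rw [pv_byte_eq_mod]; exact Int.emod_lt_of_pos v (by norm_num)

def pvWord (vals : List Int) (i : Int) : Int :=
  (PySem.List.pyRange 0 4 1).foldl
    (fun w j =>
      if i + j < (vals.length : Int) then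
        PySem.Int.bor w ((PySem.Int.band (PySem.List.pyGetD vals (i + j) 0) 255) <<< (j * 8).toNat)
      else w) 0

def pvByteAt (vals : List Int) (j : Int) : Int :=
  if j < (vals.length : Int) then PySem.Int.band (PySem.List.pyGetD vals j 0) 255 else 0

theorem pv_byteAt_nonneg (vals : List Int) (j : Int) : 0 ≤ pvByteAt vals j := by
  unfold pvByteAt; split_ifs
  · exact pv_byte_nonneg _
  · norm_num

theorem pv_byteAt_lt (vals : List Int) (j : Int) : pvByteAt vals j < 256 := by
  unfold pvByteAt; split_ifs
  · exact pv_byte_lt _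
  · norm_num

-- A's inner 4-step fold is the little-endian value of the four guard-masked bytes
theorem pvWord_eq (vals : List Int) (i : Int) :
    pvWord vals i = pvByteAt vals i + pvByteAt vals (i+1) * 256
      + pvByteAt vals (i+2) * 65536 + pvByteAt vals (i+3) * 16777216 := by
  have hr4 : PySem.List.pyRange 0 4 1 = [0,1,2,3] := by decide
  have step : ∀ (w j : Int), 0 ≤ w → w < 2^((j*8).toNat) →
      (if i + j < (vals.length:Int) then
        PySem.Int.bor w ((PySem.Int.band (PySem.List.pyGetD vals (i+j) 0) 255) <<< (j*8).toNat)
      else w) = w + pvByteAt vals (i+j) * 2^((j*8).toNat) := by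
    intro w j hw0 hwk
    unfold pvByteAt
    split_ifs with h
    · exact pv_bor_low w _ _ hw0 hwk (pv_byte_nonneg _)
    · ring
  have c0 := pv_byteAt_nonneg vals i; have c0' := pv_byteAt_lt vals i
  have b0 := pv_byteAt_nonneg vals (i+0); have b0' := pv_byteAt_lt vals (i+0)
  have b1 := pv_byteAt_nonneg vals (i+1); have b1' := pv_byteAt_lt vals (i+1)
  have b2 := pv_byteAt_nonneg vals (i+2); have b2' := pv_byteAt_lt vals (i+2)
  unfold pvWord
  rw [hr4]
  simp only [List.foldl_cons, List.foldl_nil]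
  rw [step 0 0 (by norm_num) (by norm_num)]
  rw [step (0 + pvByteAt vals (i+0) * 2^(((0:Int)*8).toNat)) 1
      (by norm_num [show ((8:Int)).toNat = 8 from rfl] <;> omega)
      (by norm_num [show ((8:Int)).toNat = 8 from rfl] <;> omega)]
  rw [step (0 + pvByteAt vals (i+0) * 2^(((0:Int)*8).toNat) + pvByteAt vals (i+1) * 2^(((1:Int)*8).toNat)) 2
      (by norm_num [show ((8:Int)).toNat = 8 from rfl, show ((16:Int)).toNat = 16 from rfl] <;> omega)
      (by norm_num [show ((8:Int)).toNat = 8 from rfl, show ((16:Int)).toNat = 16 from rfl] <;> omega)]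
  rw [step (0 + pvByteAt vals (i+0) * 2^(((0:Int)*8).toNat) + pvByteAt vals (i+1) * 2^(((1:Int)*8).toNat) + pvByteAt vals (i+2) * 2^(((2:Int)*8).toNat)) 3
      (by norm_num [show ((8:Int)).toNat = 8 from rfl, show ((16:Int)).toNat = 16 from rfl, show ((24:Int)).toNat = 24 from rfl] <;> omega)
      (by norm_num [show ((8:Int)).toNat = 8 from rfl, show ((16:Int)).toNat = 16 from rfl, show ((24:Int)).toNat = 24 from rfl] <;> omega)]
  norm_num [show ((8:Int)).toNat = 8 from rfl, show ((16:Int)).toNat = 16 from rfl, show ((24:Int)).toNat = 24 from rfl]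

theorem pv_getD_cons (x : Int) (l : List Int) (i : Int) (hi : 0 ≤ i) (d : Int) :
    PySem.List.pyGetD (x::l) (i+1) d = PySem.List.pyGetD l i d := by
  simp [PySem.List.pyGetD, PySem.List.pyGet?, PySem.List.pyIdx?, hi, show (0:Int) ≤ i+1 by omega]
  by_cases h : i < (l.length:Int)
  · have h2 : i.toNat < l.length := by omega
    simp [h, show (i+1).toNat = i.toNat + 1 by omega, List.getElem?_eq_getElem h2]
  · simp [h]

theorem pv_byteAt_cons (x : Int) (l : List Int) (j : Int) (hj : 0 ≤ j) :
    pvByteAt (x::l) (j+1) = pvByteAt l j := by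
  unfold pvByteAt
  rw [pv_getD_cons x l j hj]
  exact if_congr (by simp) rfl rfl

theorem pv_byteAt_cons4 (a b c d : Int) (l : List Int) (j : Int) (hj : 0 ≤ j) :
    pvByteAt (a::b::c::d::l) (j+4) = pvByteAt l j := by
  rw [show j+4 = (j+3)+1 by ring, pv_byteAt_cons _ _ _ (by omega),
      show j+3 = (j+2)+1 by ring, pv_byteAt_cons _ _ _ (by omega),
      show j+2 = (j+1)+1 by ring, pv_byteAt_cons _ _ _ (by omega),
      pv_byteAt_cons _ _ _ hj]

-- A's outer append-fold is a map of pvWord over the stride-4 range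
theorem pv_A_map (vals : List Int) :
    int8_pack vals = (PySem.List.pyRange 0 (vals.length:Int) 4).map (pvWord vals) := by
  unfold int8_pack pvWord
  exact (PySem.List.foldl_append_singleton_eq_map _ _ []).trans (List.nil_append _)

-- the stride-4 range over [0, n) as a Nat range
theorem pv_range_count (n : Nat) :
    PySem.List.pyRange 0 (n:Int) 4 = (List.range ((n+3)/4)).map (fun k => ((4*k : Nat) : Int)) := by
  rw [PySem.List.pyRange_of_pos 0 (n:Int) (by norm_num)]
  by_cases h : 0 < n
  · rw [if_pos (by exact_mod_cast h)]
    have h1 : ((n:Int) - 0 + 4 - 1) / 4 = (((n+3)/4 : Nat) : Int) := by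
      rw [show (n:Int) - 0 + 4 - 1 = ((n+3 : Nat) : Int) by push_cast; ring,
          show (4:Int) = ((4:Nat):Int) from rfl, ← Int.natCast_div]
    rw [h1, Int.toNat_natCast]
    exact List.map_congr_left (fun k _ => by push_cast; ring)
  · have hn : n = 0 := by omega
    subst hn
    simp

-- the padding length is invariant under removing a whole 4-byte group
theorem pv_mod4 (m : Nat) :
    PySem.Int.mod (-(((m+4):Nat):Int)) 4 = PySem.Int.mod (-((m:Nat):Int)) 4 := by
  rw [PySem.Int.mod_eq_emod_of_pos (by norm_num), PySem.Int.mod_eq_emod_of_pos (by norm_num)]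
  push_cast
  omega

-- B peels one 4-byte group per cons^4
theorem pv_alt_chunk (a b c d : Int) (rest : List Int) :
    int8_pack_alt (a::b::c::d::rest) =
      pvFromBytesLE [PySem.Int.band a 255, PySem.Int.band b 255,
        PySem.Int.band c 255, PySem.Int.band d 255] :: int8_pack_alt rest := by
  unfold int8_pack_alt
  simp only [List.map_cons, List.length_cons, List.length_map, List.cons_append]
  rw [show (rest.length + 1 + 1 + 1 + 1 : Nat) = rest.length + 4 by ring, pv_mod4]
  simp [pvWords4]

theorem pv_byteAt_head (x : Int) (l : List Int) : pvByteAt (x::l) 0 = PySem.Int.band x 255 := by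
  unfold pvByteAt
  rw [if_pos (by simp)]
  congr 1
  simp [PySem.List.pyGetD, PySem.List.pyGet?, PySem.List.pyIdx?]

theorem pv_byteAt_oob (l : List Int) (j : Int) (h : (l.length:Int) ≤ j) : pvByteAt l j = 0 := by
  unfold pvByteAt
  rw [if_neg (by omega)]

theorem pv_byteAt_one (x y : Int) (l : List Int) :
    pvByteAt (x::y::l) 1 = PySem.Int.band y 255 := by
  rw [show (1:Int) = 0+1 from rfl, pv_byteAt_cons _ _ _ (le_refl 0), pv_byteAt_head]

theorem pv_byteAt_two (x y z : Int) (l : List Int) :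
    pvByteAt (x::y::z::l) 2 = PySem.Int.band z 255 := by
  rw [show (2:Int) = 1+1 from rfl, pv_byteAt_cons _ _ _ (by norm_num), pv_byteAt_one]

theorem pv_byteAt_three (x y z w : Int) (l : List Int) :
    pvByteAt (x::y::z::w::l) 3 = PySem.Int.band w 255 := by
  rw [show (3:Int) = 2+1 from rfl, pv_byteAt_cons _ _ _ (by norm_num), pv_byteAt_two]

theorem int8_pack_eq_alt : ∀ vals : List Int, int8_pack vals = int8_pack_alt vals
  | [] => by decide
  | [a] => by
    rw [pv_A_map, show (([a] : List Int).length : Int) = ((1:Nat) : Int) by simp, pv_range_count]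
    have halt : int8_pack_alt [a] = pvWords4 [PySem.Int.band a 255, 0, 0, 0] := by
      unfold int8_pack_alt
      norm_num [show (PySem.Int.mod (-(1:Int)) 4).toNat = 3 by decide]
      rfl
    rw [halt]
    norm_num [pvWord_eq, pvWords4, pvFromBytesLE]
    rw [pv_byteAt_head, pv_byteAt_oob _ 1 (by norm_num), pv_byteAt_oob _ 2 (by norm_num),
        pv_byteAt_oob _ 3 (by norm_num)]
    ring
  | [a, b] => by
    rw [pv_A_map, show (([a,b] : List Int).length : Int) = ((2:Nat) : Int) by simp, pv_range_count]
    have halt : int8_pack_alt [a, b] = pvWords4 [PySem.Int.band a 255, PySem.Int.band b 255, 0, 0] := by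
      unfold int8_pack_alt
      norm_num [show (PySem.Int.mod (-(2:Int)) 4).toNat = 2 by decide]
      rfl
    rw [halt]
    norm_num [pvWord_eq, pvWords4, pvFromBytesLE]
    rw [pv_byteAt_head, pv_byteAt_one, pv_byteAt_oob _ 2 (by norm_num), pv_byteAt_oob _ 3 (by norm_num)]
    ring
  | [a, b, c] => by
    rw [pv_A_map, show (([a,b,c] : List Int).length : Int) = ((3:Nat) : Int) by simp, pv_range_count]
    have halt : int8_pack_alt [a, b, c] =
        pvWords4 [PySem.Int.band a 255, PySem.Int.band b 255, PySem.Int.band c 255, 0] := by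
      unfold int8_pack_alt
      norm_num [show (PySem.Int.mod (-(3:Int)) 4).toNat = 1 by decide]
    rw [halt]
    norm_num [pvWord_eq, pvWords4, pvFromBytesLE]
    rw [pv_byteAt_head, pv_byteAt_one, pv_byteAt_two, pv_byteAt_oob _ 3 (by norm_num)]
    ring
  | a :: b :: c :: d :: rest => by
    have ih := int8_pack_eq_alt rest
    rw [pv_A_map, pv_alt_chunk]
    rw [show (((a::b::c::d::rest) : List Int).length : Int) = ((rest.length + 4 : Nat) : Int) by
      simp; ring]
    rw [pv_range_count, show (rest.length + 4 + 3)/4 = (rest.length+3)/4 + 1 by omega,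
        List.range_succ_eq_map]
    simp only [List.map_cons, List.map_map]
    congr 1
    · -- the head word
      norm_num [pvWord_eq, pvFromBytesLE]
      rw [pv_byteAt_head, pv_byteAt_one, pv_byteAt_two, pv_byteAt_three]
      ring
    · -- the tail words
      rw [← ih, pv_A_map rest, pv_range_count, List.map_map]
      refine List.map_congr_left (fun k _ => ?_)
      show pvWord (a::b::c::d::rest) ((4*(k+1) : Nat) : Int) = pvWord rest ((4*k : Nat) : Int)
      rw [pvWord_eq, pvWord_eq]
      have e : ((4*(k+1) : Nat) : Int) = ((4*k : Nat) : Int) + 4 := by push_cast; ring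
      have hx : (0:Int) ≤ ((4*k : Nat) : Int) := by positivity
      rw [e, pv_byteAt_cons4 _ _ _ _ _ _ hx,
          show ((4*k:Nat):Int)+4+1 = (((4*k:Nat):Int)+1)+4 by ring,
          pv_byteAt_cons4 _ _ _ _ _ _ (by omega),
          show ((4*k:Nat):Int)+4+2 = (((4*k:Nat):Int)+2)+4 by ring,
          pv_byteAt_cons4 _ _ _ _ _ _ (by omega),
          show ((4*k:Nat):Int)+4+3 = (((4*k:Nat):Int)+3)+4 by ring,
          pv_byteAt_cons4 _ _ _ _ _ _ (by omega)]

-- ===== VERDICT (by name: the statement is the Claim_ definition above) =====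
theorem int8_pack_spec : Claim_equal_int8_pack := by
  intro vals _
  unfold Spec_int8_pack
  exact int8_pack_eq_alt vals
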